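-- pv_equiv track=rewrite | github.com/tnpfldyd/TIL | 백준/Silver/2529. 부등호/부등호.py | solve_inequality
-- ===== SOURCE A (Python) =====
-- def solve_inequality(k, operators):
--     used = [False] * 10
--     result = []
--     all_results = []
--
--     def is_valid():
--         for i in range(len(result) - 1):
--             if i < len(operators):
--                 if operators[i] == '<' and result[i] >= result[i + 1]:
--                     return False
--                 elif operators[i] == '>' and result[i] <= result[i + 1]:
--                     return False
--         return True
--
--     def backtrack(pos):
--         if pos == k + 1:
--             if is_valid():
--                 all_results.append(result[:])
--             return
--
--         for num in range(10):
--             if not used[num]: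
--                 used[num] = True
--                 result.append(num)
--
--                 if is_valid():
--                     backtrack(pos + 1)
--
--                 result.pop()
--                 used[num] = False
--
--     backtrack(0)
--
--     string_results = []
--     for nums in all_results:
--         string_results.append(''.join(map(str, nums)))
--
--     max_result = max(string_results)
--     min_result = min(string_results)
--
--     return max_result, min_result
-- ===== SOURCE B (Python) =====
-- def solve_inequality(k, operators):
--     n = k + 1
--
--     def ok(prev, num, i):
--         if 0 <= i < len(operators):
--             if operators[i] == '<':
--                 return prev < num
--             if operators[i] == '>':
--                 return prev > num
--         return True
--
--     def dfs(seq, order):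
--         if len(seq) == n:
--             return ''.join(map(str, seq))
--         for num in order:
--             if num not in seq and (not seq or ok(seq[-1], num, len(seq) - 1)):
--                 r = dfs(seq + [num], order)
--                 if r is not None:
--                     return r
--         return None
--
--     return dfs([], range(9, -1, -1)), dfs([], range(10))
-- ===== Notes on version B (the rewrite author's own statement) =====
-- stated objective: alternative
-- what changed: A enumerates every valid digit sequence by full backtracking (re-validating the whole prefix at each step) and then takes max/min of all the strings; B instead runs two first-solution DFS searches - digits tried in descending order for the maximum, ascending for the minimum - checking only the newly added constraint, and stops at the first complete sequence each, so it usually avoids materialising the solution set (worst case still exponential).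
import Mathlib
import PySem

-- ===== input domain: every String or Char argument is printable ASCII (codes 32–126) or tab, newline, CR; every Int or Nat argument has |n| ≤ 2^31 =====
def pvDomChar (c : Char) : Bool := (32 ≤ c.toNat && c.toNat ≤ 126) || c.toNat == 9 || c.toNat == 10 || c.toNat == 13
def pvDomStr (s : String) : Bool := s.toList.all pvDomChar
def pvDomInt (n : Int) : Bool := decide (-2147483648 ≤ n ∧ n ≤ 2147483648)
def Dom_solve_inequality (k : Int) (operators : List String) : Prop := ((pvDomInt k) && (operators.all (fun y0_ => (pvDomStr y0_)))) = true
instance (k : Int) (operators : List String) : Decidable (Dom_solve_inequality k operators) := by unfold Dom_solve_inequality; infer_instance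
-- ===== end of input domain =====

-- B replaces A's enumerate-all-then-max/min backtracking by two first-solution DFS
-- searches (digits descending for the maximum, ascending for the minimum), each checking
-- only the newly added constraint.

-- ===== PORT A =====
-- Python's ''.join(map(str, nums))
def pvJoinDigits (nums : List Int) : String :=
  PySem.Str.join "" (nums.map PySem.Int.toStr)

-- is_valid: rescans the whole current prefix against the operators
def pvIsValid (operators : List String) (result : List Int) : Bool :=
  (List.range (result.length - 1)).all fun i =>
    if (i : Int) < (operators.length : Int) then
      if PySem.List.pyGetD operators (i : Int) "" = "<" ∧
          PySem.List.pyGetD result (i : Int) 0 ≥ PySem.List.pyGetD result ((i : Int) + 1) 0 then false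
      else if PySem.List.pyGetD operators (i : Int) "" = ">" ∧
          PySem.List.pyGetD result (i : Int) 0 ≤ PySem.List.pyGetD result ((i : Int) + 1) 0 then false
      else true
    else true

-- backtrack: pos always equals result.length; the fuel (11 at the top call) only makes
-- the recursion structural — the Python recursion depth is bounded by the 10 `used` slots.
def pvBacktrack (k : Int) (operators : List String) :
    Nat → List Bool → List Int → List (List Int)
  | 0, _, _ => []
  | fuel + 1, used, result =>
    if (result.length : Int) = k + 1 then
      if pvIsValid operators result then [result] else []
    else
      (PySem.List.pyRange 0 10 1).foldl (fun acc num =>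
        if PySem.List.pyGetD used num false = false then
          if pvIsValid operators (result ++ [num]) then
            acc ++ pvBacktrack k operators fuel (PySem.List.pySetD used num true) (result ++ [num])
          else acc
        else acc) []

def solve_inequality (k : Int) (operators : List String) : List String :=
  let all_results := pvBacktrack k operators 11 (List.replicate 10 false) []
  let string_results := all_results.map pvJoinDigits
  match PySem.List.max? string_results (fun x => x),
        PySem.List.min? string_results (fun x => x) with
  | some mx, some mn => [mx, mn]
  | _, _ => []   -- Python's max() raises ValueError on the empty list; excluded by Pre_

-- ===== PORT B =====
-- B's copy of Python's ''.join(map(str, seq))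
def pvStrDigits (nums : List Int) : String :=
  PySem.Str.join "" (nums.map PySem.Int.toStr)

def pvOk (operators : List String) (prev num : Int) (i : Int) : Bool :=
  if 0 ≤ i ∧ i < (operators.length : Int) then
    -- index i is in range here, so the getD default is never used
    if PySem.List.pyGetD operators i "" = "<" then decide (prev < num)
    else if PySem.List.pyGetD operators i "" = ">" then decide (prev > num)
    else true
  else true

mutual
-- first-solution DFS: digits tried in `order`; only the newest constraint is checked
def pvDfs (operators : List String) (n : Int) (order : List Int) :
    Nat → List Int → Option String
  | 0, _ => none
  | fuel + 1, seq =>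
    if (seq.length : Int) = n then some (pvStrDigits seq)
    else pvTry operators n order fuel seq order
termination_by fuel _seq => (fuel, 0)

def pvTry (operators : List String) (n : Int) (order : List Int) :
    Nat → List Int → List Int → Option String
  | _, _, [] => none
  | fuel, seq, num :: rest =>
    if num ∉ seq ∧ (seq = [] ∨ pvOk operators (PySem.List.pyGetD seq (-1) 0) num ((seq.length : Int) - 1) = true) then
      match pvDfs operators n order fuel (seq ++ [num]) with
      | some r => some r
      | none => pvTry operators n order fuel seq rest
    else pvTry operators n order fuel seq rest
termination_by fuel _seq pend => (fuel, pend.length + 1)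
end

def solve_inequality_alt (k : Int) (operators : List String) : List String :=
  let n := k + 1
  match pvDfs operators n (PySem.List.pyRange 9 (-1) (-1)) 11 [],
        pvDfs operators n (PySem.List.pyRange 0 10 1) 11 [] with
  | some mx, some mn => [mx, mn]
  | none, _ => []   -- Python returns (None, None) here; outside Pre_
  | _, none => []

-- ===== PRECONDITION & SPEC =====
-- Pre_ excludes exactly k ≤ -2 and k ≥ 10: there no digit sequence of length k+1 with
-- distinct decimal digits exists, the enumeration is empty and A's max() raises ValueError.
def Pre_solve_inequality (k : Int) (operators : List String) : Prop := -1 ≤ k ∧ k ≤ 9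
instance (k : Int) (operators : List String) : Decidable (Pre_solve_inequality k operators) := by unfold Pre_solve_inequality; infer_instance
def pvWitness_solve_inequality : Int × List String := (2, ["<", ">"])
def Spec_solve_inequality (k : Int) (operators : List String) (out : List String) : Prop := out = solve_inequality_alt k operators
instance (k : Int) (operators : List String) (out : List String) : Decidable (Spec_solve_inequality k operators out) := by unfold Spec_solve_inequality; infer_instance

-- ===== CLAIM (what is proved, stated in full; the proofs are below) =====
def Claim_equal_solve_inequality : Prop := ∀ (k : Int) (operators : List String), Dom_solve_inequality k operators → Pre_solve_inequality k operators → Spec_solve_inequality k operators (solve_inequality k operators)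

-- ===== LEMMAS AND PROOFS =====

-- Proof-side enumeration: A's backtracking with the `used` array replaced by membership
-- in the current prefix, parametric in the digit order.
def pvE (k : Int) (ops : List String) (order : List Int) : Nat → List Int → List (List Int)
  | 0, _ => []
  | fuel + 1, res =>
    if (res.length : Int) = k + 1 then
      if pvIsValid ops res then [res] else []
    else
      order.flatMap fun num =>
        if num ∉ res ∧ pvIsValid ops (res ++ [num]) = true then
          pvE k ops order fuel (res ++ [num])
        else []

theorem pv_pyGetD_pySetD_int (xs : List Bool) (i m : Int) (v d : Bool)
    (h0 : 0 ≤ i) (h : i < (xs.length : Int)) (hm0 : 0 ≤ m) :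
    PySem.List.pyGetD (PySem.List.pySetD xs i v) m d =
      if m = i then v else PySem.List.pyGetD xs m d := by
  rw [← Int.toNat_of_nonneg h0, ← Int.toNat_of_nonneg hm0,
    PySem.List.pyGetD_pySetD_natCast xs i.toNat m.toNat v d (by omega)]
  by_cases hmi : m.toNat = i.toNat
  · rw [if_pos hmi, if_pos (by omega : (m.toNat : Int) = (i.toNat : Int))]
  · rw [if_neg hmi, if_neg (by omega : ¬ (m.toNat : Int) = (i.toNat : Int))]

-- A's backtracking equals pvE on the ascending digit order
theorem pvBacktrack_eq_pvE (k : Int) (ops : List String) :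
    ∀ (fuel : Nat) (used : List Bool) (res : List Int),
      used.length = 10 →
      (∀ num : Int, 0 ≤ num → num < 10 →
        (PySem.List.pyGetD used num false = true ↔ num ∈ res)) →
      pvBacktrack k ops fuel used res = pvE k ops (PySem.List.pyRange 0 10 1) fuel res := by
  intro fuel
  induction fuel with
  | zero => intro used res _ _; rfl
  | succ fuel ih =>
    intro used res hlen hinv
    simp only [pvBacktrack, pvE]
    split
    · rfl
    · have hstep : ∀ (l : List Int), (∀ x ∈ l, 0 ≤ x ∧ x < 10) → ∀ acc : List (List Int),
          l.foldl (fun acc num =>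
            if PySem.List.pyGetD used num false = false then
              if pvIsValid ops (res ++ [num]) then
                acc ++ pvBacktrack k ops fuel (PySem.List.pySetD used num true) (res ++ [num])
              else acc
            else acc) acc =
          acc ++ (l.flatMap fun num =>
            if num ∉ res ∧ pvIsValid ops (res ++ [num]) = true then
              pvE k ops (PySem.List.pyRange 0 10 1) fuel (res ++ [num])
            else []) := by
        intro l
        induction l with
        | nil => intro _ acc; simp
        | cons num rest ihl =>
          intro hm acc
          have h09 := hm num (by simp)
          have hrest := fun x hx => hm x (List.mem_cons_of_mem _ hx)
          simp only [List.foldl_cons, List.flatMap_cons]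
          have husednum : PySem.List.pyGetD used num false = false ↔ num ∉ res := by
            have hi := hinv num h09.1 h09.2
            cases hb : PySem.List.pyGetD used num false
            · rw [hb] at hi; simp at hi; simp [hi]
            · rw [hb] at hi; simp at hi; simp [hi]
          by_cases hmem : num ∉ res
          · rw [if_pos (husednum.mpr hmem)]
            by_cases hv : pvIsValid ops (res ++ [num]) = true
            · rw [if_pos hv, ihl hrest, if_pos ⟨hmem, hv⟩]
              have hrec : pvBacktrack k ops fuel (PySem.List.pySetD used num true) (res ++ [num]) =
                  pvE k ops (PySem.List.pyRange 0 10 1) fuel (res ++ [num]) := by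
                apply ih
                · rw [PySem.List.length_pySetD, hlen]
                · intro m hm0 hm10
                  rw [pv_pyGetD_pySetD_int used num m true false h09.1 (by omega) hm0]
                  by_cases hmn : m = num
                  · rw [if_pos hmn]
                    simp [hmn]
                  · rw [if_neg hmn, hinv m hm0 hm10]
                    simp [hmn]
              rw [hrec, List.append_assoc]
            · rw [if_neg (by simpa using hv), ihl hrest, if_neg (fun hc => hv hc.2)]
              simp
          · rw [if_neg (fun hc => hmem (husednum.mp hc)), ihl hrest,
              if_neg (fun hc => hmem hc.1)]
            simp
      rw [hstep _ (fun x hx => by rw [PySem.List.mem_pyRange_one] at hx; omega) []]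
      simp

-- reversing the digit order reverses the enumeration
theorem pvE_reverse (k : Int) (ops : List String) (order : List Int) :
    ∀ (fuel : Nat) (res : List Int),
      pvE k ops order.reverse fuel res = (pvE k ops order fuel res).reverse := by
  intro fuel
  induction fuel with
  | zero => intro res; rfl
  | succ fuel ih =>
    intro res
    simp only [pvE]
    split
    · split <;> rfl
    · rw [List.reverse_flatMap]
      have hf : ∀ num : Int,
          (if num ∉ res ∧ pvIsValid ops (res ++ [num]) = true then
            pvE k ops order.reverse fuel (res ++ [num]) else []) =
          (List.reverse ∘ fun num =>
            if num ∉ res ∧ pvIsValid ops (res ++ [num]) = true then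
              pvE k ops order fuel (res ++ [num]) else []) num := by
        intro num
        simp only [Function.comp]
        split
        · exact ih (res ++ [num])
        · rfl
      exact List.flatMap_congr fun num _ => hf num

-- Nat-indexed form of the per-position check of is_valid
def pvChk (ops : List String) (res : List Int) (i : Nat) : Bool :=
  if i < ops.length then
    if ops.getD i "" = "<" ∧ res.getD i 0 ≥ res.getD (i + 1) 0 then false
    else if ops.getD i "" = ">" ∧ res.getD i 0 ≤ res.getD (i + 1) 0 then false
    else true
  else true

theorem pv_all_congr {α : Type} {p q : α → Bool} :
    ∀ l : List α, (∀ x ∈ l, p x = q x) → l.all p = l.all q := by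
  intro l
  induction l with
  | nil => intro _; rfl
  | cons x t ih =>
    intro h
    simp only [List.all_cons, h x (by simp), ih fun y hy => h y (by simp [hy])]

theorem pvIsValid_eq (ops : List String) (res : List Int) :
    pvIsValid ops res = (List.range (res.length - 1)).all (pvChk ops res) := by
  unfold pvIsValid pvChk
  apply pv_all_congr
  intro i _
  have h1 : ((i : Int) + 1) = ((i + 1 : Nat) : Int) := by push_cast; ring
  by_cases hi : i < ops.length
  · rw [if_pos (by exact_mod_cast hi : (i : Int) < (ops.length : Int)), if_pos hi, h1]
    simp only [PySem.List.pyGetD_natCast]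
  · rw [if_neg (by exact_mod_cast hi : ¬ (i : Int) < (ops.length : Int)), if_neg hi]

theorem pvChk_append (ops : List String) (res : List Int) (num : Int) (i : Nat)
    (hi : i + 1 < res.length) :
    pvChk ops (res ++ [num]) i = pvChk ops res i := by
  unfold pvChk
  rw [List.getD_append _ _ _ i (by omega), List.getD_append _ _ _ (i + 1) hi]

-- extending a valid prefix: the full rescan reduces to B's last-edge check
theorem pvIsValid_append (ops : List String) (res : List Int) (num : Int)
    (h : pvIsValid ops res = true) :
    (pvIsValid ops (res ++ [num]) = true ↔
      (res = [] ∨ pvOk ops (PySem.List.pyGetD res (-1) 0) num ((res.length : Int) - 1) = true)) := by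
  cases res with
  | nil =>
    constructor
    · intro _; exact Or.inl rfl
    · intro _
      rw [pvIsValid_eq]
      simp
  | cons r0 rs =>
    rw [pvIsValid_eq] at h ⊢
    have hlen : ((r0 :: rs) ++ [num]).length - 1 = rs.length + 1 := by
      simp
    rw [hlen, List.range_succ, List.all_append]
    have hfirst : (List.range rs.length).all (pvChk ops ((r0 :: rs) ++ [num])) = true := by
      rw [pv_all_congr _ fun i hi =>
        pvChk_append ops (r0 :: rs) num i (by simp at hi ⊢; omega)]
      simpa using h
    rw [hfirst]
    have hne : (r0 :: rs : List Int) ≠ [] := by simp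
    rw [PySem.List.pyGetD_neg_one (r0 :: rs) 0 hne]
    have hlast : ((r0 :: rs) ++ [num]).getD rs.length 0 = (r0 :: rs).getLast hne := by
      rw [List.getD_append _ _ _ rs.length (by simp),
        List.getD_eq_getElem _ _ (by simp), List.getLast_eq_getElem]
      simp only [List.length_cons, Nat.add_sub_cancel]
      rfl
    have hnum : ((r0 :: rs) ++ [num]).getD (rs.length + 1) 0 = num := by
      rw [List.getD_eq_getElem _ _ (by simp)]
      exact List.getElem_concat_length (by simp) _
    have hcast : (((r0 :: rs).length : Int) - 1) = ((rs.length : Nat) : Int) := by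
      simp
    rw [hcast]
    simp only [List.all_cons, List.all_nil, Bool.and_true, true_and]
    unfold pvChk pvOk
    rw [hlast, hnum]
    simp only [PySem.List.pyGetD_natCast]
    have hnn : (0 : Int) ≤ (rs.length : Int) := by positivity
    by_cases hlt : rs.length < ops.length
    · have hcond : (0 : Int) ≤ (rs.length : Int) ∧ (rs.length : Int) < (ops.length : Int) :=
        ⟨hnn, by exact_mod_cast hlt⟩
      rw [if_pos hlt, if_pos hcond]
      rw [or_iff_right (by simp : ¬ (r0 :: rs : List Int) = [])]
      by_cases hop1 : ops.getD rs.length "" = "<"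
      · simp only [hop1, (by decide : ("<" : String) ≠ ">")]
        by_cases hc : (r0 :: rs).getLast hne ≥ num <;> simp [hc] <;> omega
      · by_cases hop2 : ops.getD rs.length "" = ">"
        · simp only [hop2, (by decide : (">" : String) ≠ "<")]
          by_cases hc : (r0 :: rs).getLast hne ≤ num <;> simp [hc] <;> omega
        · rw [List.getD_eq_getElem?_getD] at hop1 hop2
          simp [hop1, hop2]
    · rw [if_neg hlt, if_neg (by intro hc; exact hlt (by exact_mod_cast hc.2))]
      simp

-- the inner for-loop of B's DFS, against the corresponding piece of the enumeration
theorem pvTry_eq_head (k : Int) (ops : List String) (order : List Int) (fuel : Nat)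
    (hdfs : ∀ seq : List Int, pvIsValid ops seq = true →
      pvDfs ops (k + 1) order fuel seq = ((pvE k ops order fuel seq).map pvJoinDigits).head?) :
    ∀ (pend : List Int) (seq : List Int), pvIsValid ops seq = true →
      pvTry ops (k + 1) order fuel seq pend =
        ((pend.flatMap fun num =>
          if num ∉ seq ∧ pvIsValid ops (seq ++ [num]) = true then
            pvE k ops order fuel (seq ++ [num])
          else []).map pvJoinDigits).head? := by
  intro pend
  induction pend with
  | nil => intro seq _; simp [pvTry]
  | cons num rest ih =>
    intro seq h
    simp only [pvTry, List.flatMap_cons, List.map_append, List.head?_append]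
    have hiff : (num ∉ seq ∧ pvIsValid ops (seq ++ [num]) = true) ↔
        (num ∉ seq ∧ (seq = [] ∨ pvOk ops (PySem.List.pyGetD seq (-1) 0) num ((seq.length : Int) - 1) = true)) :=
      and_congr_right fun _ => pvIsValid_append ops seq num h
    by_cases hg : num ∉ seq ∧ pvIsValid ops (seq ++ [num]) = true
    · rw [if_pos (hiff.mp hg), if_pos hg, hdfs _ hg.2]
      cases hE : ((pvE k ops order fuel (seq ++ [num])).map pvJoinDigits).head? with
      | some r => simp [hE]
      | none => simp [hE, ih seq h]
    · rw [if_neg (fun hc => hg (hiff.mpr hc)), if_neg hg]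
      simp [ih seq h]

-- B's DFS returns the head of the (mapped) enumeration
theorem pvDfs_eq_head (k : Int) (ops : List String) (order : List Int) :
    ∀ (fuel : Nat) (seq : List Int), pvIsValid ops seq = true →
      pvDfs ops (k + 1) order fuel seq = ((pvE k ops order fuel seq).map pvJoinDigits).head? := by
  intro fuel
  induction fuel with
  | zero => intro seq _; simp [pvDfs, pvE]
  | succ fuel ih =>
    intro seq h
    simp only [pvDfs, pvE]
    rw [h]
    split
    · simp [pvStrDigits, pvJoinDigits]
    · exact pvTry_eq_head k ops order fuel ih order seq h

-- every enumerated sequence extends the prefix with digits drawn from `order`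
theorem pvE_shape (k : Int) (ops : List String) (order : List Int) :
    ∀ (fuel : Nat) (res : List Int) (a : List Int), a ∈ pvE k ops order fuel res →
      ∃ t, a = res ++ t ∧ ∀ d ∈ t, d ∈ order := by
  intro fuel
  induction fuel with
  | zero => intro res a h; cases h
  | succ fuel ih =>
    intro res a h
    simp only [pvE] at h
    split at h
    · split at h
      · rw [List.mem_singleton] at h
        exact ⟨[], by simp [h], by simp⟩
      · cases h
    · rw [List.mem_flatMap] at h
      obtain ⟨num, hnum, ha⟩ := h
      split at ha
      · obtain ⟨t, rfl, ht⟩ := ih _ _ ha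
        refine ⟨num :: t, by simp, ?_⟩
        intro d hd
        rcases List.mem_cons.mp hd with rfl | hd
        · exact hnum
        · exact ht d hd
      · cases ha

-- digits 0–9 render as single characters
theorem pv_toChars_digit (d : Int) (h1 : 0 ≤ d) (h2 : d < 10) :
    PySem.Int.toChars d = [Char.ofNat (48 + d.toNat)] := by
  interval_cases d <;> decide

theorem pv_join_nil_flatten (ls : List (List Char)) :
    PySem.Chars.join [] ls = ls.flatten := by
  induction ls with
  | nil => simp [PySem.Chars.join_nil]
  | cons a t ih =>
    cases t with
    | nil => simp [PySem.Chars.join_singleton]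
    | cons b t' => rw [PySem.Chars.join_cons_cons]; simp [ih]

theorem pvJoin_chars (l : List Int) :
    (pvJoinDigits l).toList = (l.map PySem.Int.toChars).flatten := by
  unfold pvJoinDigits
  rw [PySem.Str.toList_join]
  have he : "".toList = ([] : List Char) := rfl
  rw [he, pv_join_nil_flatten]
  · congr 1
    simp [List.map_map, PySem.Int.toList_toStr, Function.comp]

theorem pv_digitChar_lt (n1 n2 : Int) (h1 : 0 ≤ n1) (h5 : n1 < n2) (h4 : n2 < 10) :
    Char.ofNat (48 + n1.toNat) < Char.ofNat (48 + n2.toNat) := by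
  have h2 : n1 < 10 := by omega
  interval_cases n1 <;> interval_cases n2 <;> decide

theorem pv_lex_prefix {α : Type} [LT α] (p : List α) {a b : α} (h : a < b)
    (l1 l2 : List α) : p ++ a :: l1 < p ++ b :: l2 := by
  induction p with
  | nil => exact List.Lex.rel h
  | cons x p ih => exact List.Lex.cons ih

-- strict string comparison of two sequences diverging at one digit
theorem pvJoin_lt (res t1 t2 : List Int) (n1 n2 : Int)
    (h1 : 0 ≤ n1) (h2 : n1 < 10) (h3 : 0 ≤ n2) (h4 : n2 < 10) (h5 : n1 < n2) :
    pvJoinDigits (res ++ n1 :: t1) < pvJoinDigits (res ++ n2 :: t2) := by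
  rw [String.lt_iff_toList_lt, pvJoin_chars, pvJoin_chars]
  simp only [List.map_append, List.flatten_append, List.map_cons, List.flatten_cons]
  rw [pv_toChars_digit n1 h1 h2, pv_toChars_digit n2 h3 (by omega)]
  exact pv_lex_prefix _ (pv_digitChar_lt n1 n2 h1 h5 h4) _ _

-- the ascending enumeration is strictly increasing as strings
theorem pvE_pairwise (k : Int) (ops : List String) :
    ∀ (fuel : Nat) (res : List Int),
      (pvE k ops (PySem.List.pyRange 0 10 1) fuel res).Pairwise
        (fun a b => pvJoinDigits a < pvJoinDigits b) := by
  intro fuel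
  induction fuel with
  | zero => intro res; simp [pvE]
  | succ fuel ih =>
    intro res
    simp only [pvE]
    split
    · split <;> simp
    · have haux : ∀ pend : List Int, pend.Pairwise (· < ·) →
          (∀ x ∈ pend, 0 ≤ x ∧ x < 10) →
          (pend.flatMap fun num =>
            if num ∉ res ∧ pvIsValid ops (res ++ [num]) = true then
              pvE k ops (PySem.List.pyRange 0 10 1) fuel (res ++ [num])
            else []).Pairwise (fun a b => pvJoinDigits a < pvJoinDigits b) := by
        intro pend
        induction pend with
        | nil => intro _ _; simp
        | cons num rest ihp =>
          intro hp hmem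
          rw [List.flatMap_cons, List.pairwise_append]
          refine ⟨?_, ihp hp.of_cons fun x hx => hmem x (List.mem_cons_of_mem _ hx), ?_⟩
          · split
            · exact ih (res ++ [num])
            · simp
          · intro a ha b hb
            split at ha
            case isFalse => cases ha
            case isTrue =>
              obtain ⟨t1, rfl, _⟩ := pvE_shape k ops _ fuel _ a ha
              rw [List.mem_flatMap] at hb
              obtain ⟨num2, hnum2, hb⟩ := hb
              split at hb
              case isFalse => cases hb
              case isTrue =>
                obtain ⟨t2, rfl, _⟩ := pvE_shape k ops _ fuel _ b hb
                have h12 : num < num2 := List.rel_of_pairwise_cons hp hnum2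
                have hb1 := hmem num (by simp)
                have hb2 := hmem num2 (List.mem_cons_of_mem _ hnum2)
                have := pvJoin_lt res t1 t2 num num2 hb1.1 hb1.2 hb2.1 hb2.2 h12
                simpa [List.append_assoc] using this
      exact haux _ (PySem.List.pairwise_lt_pyRange_one 0 10)
        fun x hx => by rw [PySem.List.mem_pyRange_one] at hx; omega

-- Python's max/min on a strictly increasing list
theorem pv_foldl_min_eq {x : String} {t : List String} (h : ∀ y ∈ t, x ≤ y) :
    t.foldl min x = x := by
  induction t with
  | nil => rfl
  | cons y t ih =>
    simp only [List.foldl_cons]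
    rw [min_eq_left (h y (by simp))]
    exact ih fun z hz => h z (by simp [hz])

theorem pv_foldl_max_eq {x : String} {t : List String} (h : (x :: t).Pairwise (· ≤ ·)) :
    some (t.foldl max x) = (x :: t).getLast? := by
  induction t generalizing x with
  | nil => rfl
  | cons y t ih =>
    simp only [List.foldl_cons]
    rw [max_eq_right (List.rel_of_pairwise_cons h (by simp))]
    rw [List.getLast?_cons_cons]
    exact ih (List.Pairwise.of_cons h)

theorem pv_min?_sorted {S : List String} (h : S.Pairwise (· < ·)) :
    PySem.List.min? S (fun x => x) = S.head? := by
  cases S with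
  | nil => exact (PySem.List.min?_eq_none_iff _ _).mpr rfl
  | cons x t =>
    rw [PySem.List.min?_id_cons, List.head?_cons]
    rw [pv_foldl_min_eq fun y hy => le_of_lt (List.rel_of_pairwise_cons h hy)]

theorem pv_max?_sorted {S : List String} (h : S.Pairwise (· < ·)) :
    PySem.List.max? S (fun x => x) = S.getLast? := by
  cases S with
  | nil => exact (PySem.List.max?_eq_none_iff _ _).mpr rfl
  | cons x t =>
    rw [PySem.List.max?_id_cons]
    exact pv_foldl_max_eq (h.imp le_of_lt)

-- ===== VERDICT (by name: the statement is the Claim_ definition above) =====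
theorem solve_inequality_spec : Claim_equal_solve_inequality := by
  intro k ops _hdom _hpre
  unfold Spec_solve_inequality
  have hasc : pvBacktrack k ops 11 (List.replicate 10 false) [] =
      pvE k ops (PySem.List.pyRange 0 10 1) 11 [] := by
    apply pvBacktrack_eq_pvE
    · simp
    · intro num h1 h2
      have hg : PySem.List.pyGetD (List.replicate 10 false) num false = false := by
        interval_cases num <;> decide
      rw [hg]; simp
  have hvalid0 : pvIsValid ops ([] : List Int) = true := by
    simp [pvIsValid]
  have hdesc : PySem.List.pyRange 9 (-1) (-1) = (PySem.List.pyRange 0 10 1).reverse := by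
    have := PySem.List.pyRange_neg_one_eq_reverse 9 (-1)
    simpa using this
  have hS := pvE_pairwise k ops 11 []
  set L := pvE k ops (PySem.List.pyRange 0 10 1) 11 [] with hL
  have hpair : (L.map pvJoinDigits).Pairwise (· < ·) := by
    rw [List.pairwise_map]; exact hS
  have hmn : pvDfs ops (k + 1) (PySem.List.pyRange 0 10 1) 11 [] =
      (L.map pvJoinDigits).head? := pvDfs_eq_head k ops _ 11 [] hvalid0
  have hmx : pvDfs ops (k + 1) (PySem.List.pyRange 9 (-1) (-1)) 11 [] =
      (L.map pvJoinDigits).getLast? := by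
    rw [hdesc, pvDfs_eq_head k ops _ 11 [] hvalid0, pvE_reverse]
    rw [List.map_reverse, List.head?_reverse]
  have hA : solve_inequality k ops =
      (match (L.map pvJoinDigits).getLast?, (L.map pvJoinDigits).head? with
       | some mx, some mn => [mx, mn]
       | _, _ => []) := by
    simp only [solve_inequality, hasc, pv_max?_sorted hpair, pv_min?_sorted hpair]
  have hB : solve_inequality_alt k ops =
      (match (L.map pvJoinDigits).getLast?, (L.map pvJoinDigits).head? with
       | some mx, some mn => [mx, mn]
       | _, _ => []) := by
    simp only [solve_inequality_alt, hmx, hmn]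
    cases (L.map pvJoinDigits).getLast? <;> cases (L.map pvJoinDigits).head? <;> rfl
  rw [hA, hB]
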